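-- pv_equiv track=rewrite | github.com/SpreadSheets600/IITM-Python | Test.py | some_function
-- ===== SOURCE A (Python) =====
-- def some_function(word):
--     space = " "
--     if space in word:
--         return False
--
--     if not ("A" <= word[0] <= "Z"):
--         return False
--     for i in range(1, len(word)):
--         if not ("a" <= word[i] <= "z"):
--             return False
--     return True
-- ===== SOURCE B (Python) =====
-- def some_function(word):
--     # Three-state finite automaton run in one pass over the characters:
--     # state 0 = start (needs an uppercase letter), 1 = body (needs lowercase), 2 = dead.
--     state = 0
--     for c in word:
--         if state == 0:
--             state = 1 if "A" <= c <= "Z" else 2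
--         elif not ("a" <= c <= "z"):
--             state = 2
--     return state == 1
-- ===== Notes on version B (the rewrite author's own statement) =====
-- stated objective: alternative
-- what changed: Replaces A's staged checks (a substring scan for spaces, a separate first-character test, then an index loop over the tail) with a single pass that runs a three-state finite automaton (start/body/dead) over the characters and accepts iff it ends in the body state.
import Mathlib
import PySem

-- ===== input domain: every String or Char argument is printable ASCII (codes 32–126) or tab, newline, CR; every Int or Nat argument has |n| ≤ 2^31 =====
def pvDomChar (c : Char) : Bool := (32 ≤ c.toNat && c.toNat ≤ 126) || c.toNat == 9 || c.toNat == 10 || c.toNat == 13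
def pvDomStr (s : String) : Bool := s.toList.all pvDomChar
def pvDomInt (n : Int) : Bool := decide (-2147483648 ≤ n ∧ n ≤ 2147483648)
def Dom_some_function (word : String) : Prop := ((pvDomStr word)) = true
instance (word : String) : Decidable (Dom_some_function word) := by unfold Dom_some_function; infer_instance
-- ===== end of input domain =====

-- B replaces A's staged checks (substring space scan, first-char test, index loop) by a single pass
-- running a three-state finite automaton over the characters.

-- ===== PORT A =====
-- the 'for i in range(1, len(word))' loop with its early 'return False'
def pvLoopA (word : String) : List Int → Bool
  | [] => true
  | i :: rest =>
    match PySem.Str.pyGet? word i with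
    | none => false            -- IndexError (unreachable for in-range indices)
    | some c => if ¬('a' ≤ c ∧ c ≤ 'z') then false else pvLoopA word rest

def some_function (word : String) : Bool :=
  if PySem.Str.isIn " " word then false
  else
    match PySem.Str.pyGet? word 0 with
    | none => false            -- IndexError on word[0]; excluded by Pre_
    | some c =>
      if ¬('A' ≤ c ∧ c ≤ 'Z') then false
      else pvLoopA word (PySem.List.pyRange 1 (PySem.Str.len word) 1)

-- ===== PORT B =====
-- one automaton step: state 0 = start, 1 = body, 2 = dead
def pvStepB (state : Int) (c : Char) : Int :=
  if state == 0 then (if 'A' ≤ c ∧ c ≤ 'Z' then 1 else 2)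
  else if ¬('a' ≤ c ∧ c ≤ 'z') then 2 else state

def some_function_alt (word : String) : Bool :=
  (word.toList.foldl pvStepB 0) == 1

-- ===== PRECONDITION & SPEC =====
-- Pre_ excludes only the empty string, on which Python A raises IndexError at word[0].
def Pre_some_function (word : String) : Prop := word ≠ ""
instance (word : String) : Decidable (Pre_some_function word) := by unfold Pre_some_function; infer_instance
def pvWitness_some_function : String := "Abc"

def Spec_some_function (word : String) (out : Bool) : Prop := out = some_function_alt word
instance (word : String) (out : Bool) : Decidable (Spec_some_function word out) := by unfold Spec_some_function; infer_instance

-- ===== CLAIM (what is proved, stated in full; the proofs are below) =====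
def Claim_equal_some_function : Prop := ∀ (word : String), Dom_some_function word → Pre_some_function word → Spec_some_function word (some_function word)

-- ===== LEMMAS AND PROOFS =====

-- state 2 is absorbing
theorem pv_fold_dead (l : List Char) : l.foldl pvStepB 2 = 2 := by
  induction l with
  | nil => rfl
  | cons c cs ih =>
    simp only [List.foldl_cons, pvStepB]
    split_ifs with h1 h2 <;> simp_all

-- from the body state the automaton accepts exactly an all-lowercase suffix
theorem pv_fold_body (l : List Char) :
    l.foldl pvStepB 1 = if l.all (fun c => decide ('a' ≤ c ∧ c ≤ 'z')) then 1 else 2 := by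
  induction l with
  | nil => rfl
  | cons c cs ih =>
    simp only [List.foldl_cons, List.all_cons]
    by_cases hc : 'a' ≤ c ∧ c ≤ 'z'
    · have hstep : pvStepB 1 c = 1 := by simp [pvStepB, hc]
      simp [hstep, ih, hc]
    · have hstep : pvStepB 1 c = 2 := by simp [pvStepB, hc]
      simp [hstep, pv_fold_dead, hc]

-- closed form of B's automaton
theorem alt_closed (word : String) :
    some_function_alt word =
      (match word.toList with
       | [] => false
       | c :: cs => decide ('A' ≤ c ∧ c ≤ 'Z') && cs.all (fun c => decide ('a' ≤ c ∧ c ≤ 'z'))) := by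
  unfold some_function_alt
  cases h : word.toList with
  | nil => rfl
  | cons c cs =>
    simp only [List.foldl_cons]
    by_cases hc : 'A' ≤ c ∧ c ≤ 'Z'
    · have hstep : pvStepB 0 c = 1 := by simp [pvStepB, hc]
      rw [hstep, pv_fold_body]
      split_ifs with h2
      · simp only [decide_eq_true hc, Bool.true_and, h2]; rfl
      · simp only [decide_eq_true hc, Bool.true_and, eq_false_of_ne_true h2]; rfl
    · have hstep : pvStepB 0 c = 2 := by simp [pvStepB, hc]
      rw [hstep, pv_fold_dead]
      simp [hc]

theorem pvLoopA_range (word : String) (m i : Nat) (h : i + m = word.toList.length) :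
    pvLoopA word ((List.range m).map (fun k : Nat => (i : Int) + (k : Int))) =
      (word.toList.drop i).all (fun c => decide ('a' ≤ c ∧ c ≤ 'z')) := by
  induction m generalizing i with
  | zero =>
    simp [pvLoopA, List.drop_eq_nil_of_le (by omega : word.toList.length ≤ i)]
  | succ n ih =>
    rw [List.range_succ_eq_map]
    have hi : i < word.toList.length := by omega
    have hdrop : word.toList.drop i = word.toList[i] :: word.toList.drop (i + 1) :=
      List.drop_eq_getElem_cons hi
    have hget : PySem.Str.pyGet? word (i : Int) = some word.toList[i] := by
      rw [PySem.Str.pyGet?_natCast]; exact List.getElem?_eq_getElem hi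
    have hmaps : (List.map Nat.succ (List.range n)).map (fun k : Nat => (i : Int) + (k : Int)) =
        (List.range n).map (fun k : Nat => ((i + 1 : Nat) : Int) + (k : Int)) := by
      rw [List.map_map]; apply List.map_congr_left; intro k _
      simp [Function.comp, Nat.succ_eq_add_one]; ring
    simp only [List.map_cons, Nat.cast_zero, add_zero, pvLoopA, hget]
    rw [hdrop, List.all_cons]
    by_cases hc : 'a' ≤ word.toList[i] ∧ word.toList[i] ≤ 'z'
    · rw [if_neg (not_not_intro hc), hmaps, ih (i + 1) (by omega)]
      rw [decide_eq_true hc, Bool.true_and]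
    · rw [if_pos hc, decide_eq_false hc, Bool.false_and]

theorem alt_false_of_mem_space (word : String) (hsp : ' ' ∈ word.toList) :
    some_function_alt word = false := by
  rw [alt_closed]
  have hne : word.toList ≠ [] := List.ne_nil_of_mem hsp
  obtain ⟨c, cs, hl⟩ := List.exists_cons_of_ne_nil hne
  rw [hl]; dsimp only
  rw [hl] at hsp
  rcases List.mem_cons.mp hsp with h0 | h1
  · subst h0
    rw [decide_eq_false (by decide : ¬('A' ≤ ' ' ∧ ' ' ≤ 'Z')), Bool.false_and]
  · have hall : (cs.all (fun c => decide ('a' ≤ c ∧ c ≤ 'z'))) = false :=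
      List.all_eq_false.mpr ⟨' ', h1, by decide⟩
    rw [hall, Bool.and_false]

-- ===== VERDICT (by name: the statement is the Claim_ definition above) =====
theorem some_function_spec : Claim_equal_some_function := by
  intro word _ hpre
  unfold Spec_some_function some_function
  by_cases hsp : PySem.Str.isIn " " word
  · have hinf := (PySem.Str.isIn_iff_infix " " word).mp hsp
    have hmem : ' ' ∈ word.toList := hinf.subset (by decide)
    rw [if_pos hsp, alt_false_of_mem_space word hmem]
  · rw [if_neg hsp]
    rw [alt_closed]
    have hne : word.toList ≠ [] := by
      intro h; exact hpre (String.toList_eq_nil_iff.mp h)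
    obtain ⟨c, cs, hl⟩ := List.exists_cons_of_ne_nil hne
    have hget : PySem.Str.pyGet? word 0 = some c := by
      have h0 : PySem.Str.pyGet? word ((0 : Nat) : Int) = word.toList[(0 : Nat)]? :=
        PySem.Str.pyGet?_natCast word 0
      simp only [hl] at h0; exact h0
    rw [hget, hl]; dsimp only
    have hlen : PySem.Str.len word = (word.toList.length : Int) := by
      simp [PySem.Str.len_eq]
    have hrange : PySem.List.pyRange 1 (PySem.Str.len word) 1 =
        (List.range (word.toList.length - 1)).map (fun k : Nat => ((1 : Nat) : Int) + (k : Int)) := by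
      rw [hlen, PySem.List.pyRange_one]
      have h1 : ((word.toList.length : Int) - 1).toNat = word.toList.length - 1 := by omega
      rw [h1]
      apply List.map_congr_left; intro k _; norm_num
    rw [hrange, pvLoopA_range word (word.toList.length - 1) 1
      (by rw [hl]; simp only [List.length_cons]; omega)]
    rw [hl, List.drop_succ_cons, List.drop_zero]
    by_cases hc : 'A' ≤ c ∧ c ≤ 'Z'
    · rw [if_neg (not_not_intro hc), decide_eq_true hc, Bool.true_and]
    · rw [if_pos hc, decide_eq_false hc, Bool.false_and]
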